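-- pv_equiv track=rewrite | github.com/RideGreg/LintCode | Python/1541-put_box.py | putBox
-- ===== SOURCE A (Python) =====
-- def putBox(box, position):
--     m, n = len(box), len(position)
--     dp = [[0]*(n+1) for _ in range(m+1)]
--     for i in range(1, m+1):
--         for j in range(1, n+1):
--             if box[i-1] <= position[j-1]:
--                 dp[i][j] = dp[i-1][j-1] + 1
--             else:
--                 dp[i][j] = max(dp[i-1][j], dp[i][j-1])
--     return dp[-1][-1]
-- ===== SOURCE B (Python) =====
-- def putBox(box, position):
--     # Patience-sorting-style frontier: front[k] = 1 + minimal last box index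
--     # over order-preserving matchings of size k+1 using the positions seen so
--     # far; front is strictly increasing and the answer is its final length.
--     m = len(box)
--     front = []
--     for p in position:
--         # nxt[t] = smallest index i >= t with box[i] <= p (m if none)
--         nxt = [m] * (m + 1)
--         for i in range(m - 1, -1, -1):
--             nxt[i] = i if box[i] <= p else nxt[i + 1]
--         starts = [0] + front
--         front = [min(old, nxt[s] + 1) for old, s in zip(front, starts)]
--         if nxt[starts[-1]] < m:
--             front.append(nxt[starts[-1]] + 1)
--     return len(front)
-- ===== Notes on version B (the rewrite author's own statement) =====
-- stated objective: alternative
-- what changed: B abandons the 2-D DP table for a patience-sorting-style frontier: it maintains, for each achievable matching size k, the minimal box-prefix length achieving k, updating the frontier per position via a next-admissible-index array; the answer is the frontier's final length.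
import Mathlib
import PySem

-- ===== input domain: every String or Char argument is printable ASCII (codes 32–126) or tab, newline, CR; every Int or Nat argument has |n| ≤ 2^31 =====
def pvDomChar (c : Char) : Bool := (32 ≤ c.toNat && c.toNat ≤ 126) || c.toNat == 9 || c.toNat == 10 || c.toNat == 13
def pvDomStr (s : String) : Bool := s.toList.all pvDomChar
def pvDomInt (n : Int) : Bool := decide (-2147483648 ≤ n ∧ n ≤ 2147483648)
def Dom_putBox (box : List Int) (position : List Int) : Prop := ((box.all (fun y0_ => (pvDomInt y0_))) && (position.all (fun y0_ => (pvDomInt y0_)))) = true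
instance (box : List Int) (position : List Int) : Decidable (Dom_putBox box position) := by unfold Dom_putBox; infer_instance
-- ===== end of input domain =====

-- B replaces A's 2-D DP table by a patience-sorting-style frontier (minimal box-prefix
-- length per achievable matching size, updated per position via a next-admissible-index
-- array); same exact value (objective: alternative).

-- ===== PORT A =====
-- inner loop 'for j in range(1, n+1)': the row dp[i] is built left to right, A's assignments in order
def putBoxRow (b : Int) (position : List Int) (prev : List Int) : List Int :=
  (List.range position.length).foldl
    (fun row j =>
      row ++ [if b ≤ position.getD j 0 then prev.getD j 0 + 1
              else max (prev.getD (j+1) 0) (row.getD j 0)])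
    [(0 : Int)]
def putBox (box : List Int) (position : List Int) : Int :=
  let n := position.length
  let rows := box.foldl
    (fun rows b => rows ++ [putBoxRow b position (rows.getLast?.getD [])])
    [List.replicate (n+1) (0 : Int)]
  (rows.getLast?.getD []).getD n 0

-- ===== PORT B =====
-- 'nxt[t] = smallest i >= t with box[i] <= p, else m' built by Source B's backward fill loop
def nxtArr (box : List Int) (p : Int) : List Nat :=
  (List.range box.length).reverse.foldl
    (fun nxt i => nxt.set i (if box.getD i 0 ≤ p then i else nxt.getD (i+1) 0))
    (List.replicate (box.length + 1) box.length)
-- the body of Source B's 'for p in position' loop: update the frontier with one position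
def altStep (box : List Int) (p : Int) (front : List Nat) : List Nat :=
  let m := box.length
  let nxt := nxtArr box p
  let starts := 0 :: front
  let front' := (front.zip starts).map (fun os => min os.1 (nxt.getD os.2 m + 1))
  if nxt.getD (starts.getLastD 0) m < m then front' ++ [nxt.getD (starts.getLastD 0) m + 1]
  else front'
def putBox_alt (box : List Int) (position : List Int) : Int :=
  ((position.foldl (fun front p => altStep box p front) ([] : List Nat)).length : Int)

-- ===== PRECONDITION & SPEC =====
def Spec_putBox (box : List Int) (position : List Int) (out : Int) : Prop := out = putBox_alt box position
instance (box : List Int) (position : List Int) (out : Int) : Decidable (Spec_putBox box position out) := by unfold Spec_putBox; infer_instance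

-- ===== CLAIM (what is proved, stated in full; the proofs are below) =====
def Claim_equal_putBox : Prop := ∀ (box : List Int) (position : List Int), Dom_putBox box position → Spec_putBox box position (putBox box position)

-- ===== LEMMAS AND PROOFS =====

-- A's table recurrence (forced match when box[i-1] ≤ position[j-1])
def dpF (box position : List Int) : Nat → Nat → Int
  | 0, _ => 0
  | _+1, 0 => 0
  | i+1, j+1 =>
      if box.getD i 0 ≤ position.getD j 0 then dpF box position i j + 1
      else max (dpF box position i (j+1)) (dpF box position (i+1) j)
  termination_by i j => (i, j)

-- the full three-way max recurrence (the true max-matching value)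
def dpG (box position : List Int) : Nat → Nat → Int
  | 0, _ => 0
  | _+1, 0 => 0
  | i+1, j+1 =>
      max (max (dpG box position i (j+1)) (dpG box position (i+1) j))
        (if box.getD i 0 ≤ position.getD j 0 then dpG box position i j + 1 else 0)
  termination_by i j => (i, j)

theorem dpF_zero_right (box position : List Int) (i : Nat) : dpF box position i 0 = 0 := by
  cases i <;> simp [dpF]

theorem dpG_zero_right (box position : List Int) (i : Nat) : dpG box position i 0 = 0 := by
  cases i <;> simp [dpG]

theorem dpF_nonneg (box position : List Int) (i j : Nat) : 0 ≤ dpF box position i j := by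
  induction i generalizing j with
  | zero => simp [dpF]
  | succ i ih =>
    cases j with
    | zero => simp [dpF]
    | succ j =>
      have h1 := ih j
      have h2 := ih (j+1)
      rw [dpF]
      split_ifs
      · omega
      · have : 0 ≤ max (dpF box position i (j+1)) (dpF box position (i+1) j) :=
          le_max_of_le_left h2
        omega

theorem dpF_lipj_monoi (box position : List Int) (i : Nat) :
    (∀ j, dpF box position i (j+1) ≤ dpF box position i j + 1) ∧
    (∀ j, dpF box position i j ≤ dpF box position (i+1) j) := by
  induction i with
  | zero =>
    constructor
    · intro j; simp [dpF]
    · intro j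
      have := dpF_nonneg box position 1 j
      simp [dpF]; omega
  | succ i ih =>
    obtain ⟨lip, mono⟩ := ih
    have lip' : ∀ j, dpF box position (i+1) (j+1) ≤ dpF box position (i+1) j + 1 := by
      intro j
      rw [dpF]
      split_ifs
      · have := mono j; omega
      · have h1 := lip j
        have h2 := mono j
        have h3 := le_refl (dpF box position (i+1) j)
        have := max_le (by omega : dpF box position i (j+1) ≤ dpF box position (i+1) j + 1)
          (by omega : dpF box position (i+1) j ≤ dpF box position (i+1) j + 1)
        omega
    refine ⟨lip', fun j => ?_⟩
    cases j with
    | zero => simp [dpF_zero_right]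
    | succ j =>
      conv_rhs => rw [dpF]
      split_ifs with h
      · exact lip' j
      · exact le_max_left _ _

theorem dpF_lipi_monoj (box position : List Int) (j : Nat) :
    (∀ i, dpF box position (i+1) j ≤ dpF box position i j + 1) ∧
    (∀ i, dpF box position i j ≤ dpF box position i (j+1)) := by
  induction j with
  | zero =>
    constructor
    · intro i; rw [dpF_zero_right, dpF_zero_right]; omega
    · intro i
      cases i with
      | zero => simp [dpF]
      | succ i =>
        rw [dpF_zero_right, dpF]
        split_ifs
        · have := dpF_nonneg box position i 0; omega
        · exact le_max_of_le_left (dpF_nonneg box position i 1)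
  | succ j ih =>
    obtain ⟨lip, mono⟩ := ih
    have lip' : ∀ i, dpF box position (i+1) (j+1) ≤ dpF box position i (j+1) + 1 := by
      intro i
      rw [dpF]
      split_ifs with h
      · have := mono i; omega
      · have h1 := lip i
        have h2 := mono i
        have := max_le (by omega : dpF box position i (j+1) ≤ dpF box position i (j+1) + 1)
          (by omega : dpF box position (i+1) j ≤ dpF box position i (j+1) + 1)
        omega
    refine ⟨lip', fun i => ?_⟩
    cases i with
    | zero => simp [dpF]
    | succ i =>
      conv_rhs => rw [dpF]
      split_ifs with h
      · exact lip' i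
      · exact le_max_right _ _

theorem dpG_eq_dpF (box position : List Int) (i j : Nat) :
    dpG box position i j = dpF box position i j := by
  induction i generalizing j with
  | zero => simp [dpG, dpF]
  | succ i ih =>
    induction j with
    | zero => simp [dpG, dpF]
    | succ j ih2 =>
      rw [dpG, dpF, ih (j+1), ih j, ih2]
      split_ifs with h
      · have h1 := (dpF_lipj_monoi box position i).1 j
        have h2 := (dpF_lipi_monoj box position j).1 i
        exact max_eq_right (max_le h1 h2)
      · exact max_eq_left (le_max_of_le_left (dpF_nonneg box position i (j+1)))

theorem getD_map_range (t p : Nat) (f : Nat → Int) (hp : p < t) :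
    (((List.range t).map f).getD p 0) = f p := by
  simp [List.getD_eq_getElem?_getD, hp]

def rowL (box position : List Int) (i : Nat) : List Int :=
  (List.range (position.length + 1)).map (fun j => dpF box position i j)

theorem putBoxRow_inner (box position : List Int) (i : Nat) (k : Nat) (hk : k ≤ position.length) :
    (List.range k).foldl
      (fun row j =>
        row ++ [if box.getD i 0 ≤ position.getD j 0 then (rowL box position i).getD j 0 + 1
                else max ((rowL box position i).getD (j+1) 0) (row.getD j 0)])
      [(0 : Int)]
    = (List.range (k+1)).map (fun j => dpF box position (i+1) j) := by
  induction k with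
  | zero => simp [dpF_zero_right]
  | succ k ih =>
    rw [List.range_succ, List.foldl_append, ih (by omega)]
    simp only [List.foldl_cons, List.foldl_nil]
    rw [List.range_succ (n := k+1), List.map_append]
    congr 1
    have e1 : (rowL box position i).getD k 0 = dpF box position i k :=
      getD_map_range _ _ _ (by omega)
    have e2 : (rowL box position i).getD (k+1) 0 = dpF box position i (k+1) :=
      getD_map_range _ _ _ (by omega)
    have e3 : (((List.range (k+1)).map (fun j => dpF box position (i+1) j)).getD k 0)
        = dpF box position (i+1) k := getD_map_range _ _ _ (by omega)
    rw [e1, e2, e3]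
    simp only [List.map_cons, List.map_nil]
    congr 1
    rw [dpF]

theorem putBoxRow_step (box position : List Int) (i : Nat) :
    putBoxRow (box.getD i 0) position (rowL box position i) = rowL box position (i+1) := by
  unfold putBoxRow rowL
  exact putBoxRow_inner box position i position.length (le_refl _)

theorem rowL_zero (box position : List Int) :
    rowL box position 0 = List.replicate (position.length + 1) (0 : Int) := by
  unfold rowL
  rw [List.map_congr_left (g := fun _ => (0 : Int)) (fun a _ => by simp [dpF])]
  simp [List.map_const']

theorem putBox_outer (box position : List Int) :
    ∀ (suf : List Int) (i : Nat) (rows : List (List Int)),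
      box.drop i = suf → rows.getLast? = some (rowL box position i) →
      (suf.foldl (fun rows b => rows ++ [putBoxRow b position (rows.getLast?.getD [])]) rows).getLast?
        = some (rowL box position (i + suf.length)) := by
  intro suf
  induction suf with
  | nil => intro i rows _ h; simpa using h
  | cons b rest ih =>
    intro i rows hdrop hlast
    have hb : box.getD i 0 = b := by
      have h0 : box[i]? = some b := by
        have h1 := (List.getElem?_drop : (List.drop i box)[0]? = box[i+0]?)
        rw [hdrop] at h1
        simpa using h1.symm
      simp [List.getD_eq_getElem?_getD, h0]
    have hdrop' : box.drop (i+1) = rest := by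
      have h2 := (List.tail_drop : (List.drop i box).tail = List.drop (i+1) box)
      rw [hdrop] at h2
      simpa using h2.symm
    simp only [List.foldl_cons]
    have hstep : (rows ++ [putBoxRow b position (rows.getLast?.getD [])]).getLast?
        = some (rowL box position (i+1)) := by
      rw [List.getLast?_concat, hlast]
      simp only [Option.getD_some]
      rw [← hb, putBoxRow_step]
    have hrec := ih (i+1) _ hdrop' hstep
    have harg : i + 1 + rest.length = i + (b :: rest).length := by
      simp [List.length_cons]; omega
    rw [hrec, harg]

theorem putBox_eq_dpF (box position : List Int) :
    putBox box position = dpF box position box.length position.length := by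
  unfold putBox
  have h0 : ([List.replicate (position.length+1) (0:Int)] : List (List Int)).getLast?
      = some (rowL box position 0) := by
    rw [rowL_zero]; rfl
  have := putBox_outer box position box 0 [List.replicate (position.length+1) (0:Int)] rfl h0
  simp only [Nat.zero_add] at this
  simp only [this, Option.getD_some]
  exact getD_map_range _ _ _ (by omega)

-- ---------- B side: frontier invariant ----------

theorem dpG_nonneg (box position : List Int) (i j : Nat) : 0 ≤ dpG box position i j := by
  rw [dpG_eq_dpF]; exact dpF_nonneg box position i j

theorem dpG_mono_i (box position : List Int) {i1 i2 : Nat} (j : Nat) (h : i1 ≤ i2) :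
    dpG box position i1 j ≤ dpG box position i2 j := by
  induction i2, h using Nat.le_induction with
  | base => exact le_refl _
  | succ i2 h ih =>
    refine ih.trans ?_
    rw [dpG_eq_dpF, dpG_eq_dpF]
    exact (dpF_lipj_monoi box position i2).2 j

theorem dpG_mono_j (box position : List Int) (i j : Nat) :
    dpG box position i j ≤ dpG box position i (j+1) := by
  rw [dpG_eq_dpF, dpG_eq_dpF]
  exact (dpF_lipi_monoj box position j).2 i

theorem dpG_lip_j (box position : List Int) (i j : Nat) :
    dpG box position i (j+1) ≤ dpG box position i j + 1 := by
  rw [dpG_eq_dpF, dpG_eq_dpF]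
  exact (dpF_lipj_monoi box position i).1 j

-- characterization of one DP column step: a matching of size ≥ k among the first j+1
-- positions either ignores position j or matches it with some admissible box i' < i
theorem dpG_succ_iff (box position : List Int) (i j : Nat) (k : Int) :
    k ≤ dpG box position i (j+1) ↔
      k ≤ dpG box position i j ∨
        ∃ i', i' < i ∧ box.getD i' 0 ≤ position.getD j 0 ∧ k - 1 ≤ dpG box position i' j := by
  induction i with
  | zero => simp [dpG]
  | succ i ih =>
    rw [dpG]
    constructor
    · intro h
      rcases le_max_iff.mp h with h | h
      · rcases le_max_iff.mp h with h | h
        · rcases ih.mp h with h | ⟨i', h1, h2, h3⟩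
          · exact Or.inl (h.trans (dpG_mono_i box position j (Nat.le_succ i)))
          · exact Or.inr ⟨i', by omega, h2, h3⟩
        · exact Or.inl h
      · by_cases hb : box.getD i 0 ≤ position.getD j 0
        · rw [if_pos hb] at h
          exact Or.inr ⟨i, by omega, hb, by omega⟩
        · rw [if_neg hb] at h
          exact Or.inl (h.trans (dpG_nonneg box position (i+1) j))
    · intro h
      rcases h with h | ⟨i', h1, h2, h3⟩
      · exact le_max_of_le_left (le_max_of_le_right h)
      · by_cases hii : i' = i
        · subst hii
          refine le_max_of_le_right ?_
          rw [if_pos h2]; omega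
        · have : i' < i := by omega
          exact le_max_of_le_left (le_max_of_le_left (ih.mpr (Or.inr ⟨i', this, h2, h3⟩)))

-- specification of Source B's nxt array: first admissible box index from t on
def nxtF (box : List Int) (p : Int) (t : Nat) : Nat :=
  if h : t < box.length then
    (if box.getD t 0 ≤ p then t else nxtF box p (t+1))
  else box.length
  termination_by box.length - t

theorem nxtF_le (box : List Int) (p : Int) (t : Nat) : nxtF box p t ≤ box.length := by
  fun_induction nxtF box p t with
  | case1 t h hb => omega
  | case2 t h hb ih => exact ih
  | case3 t h => exact le_refl _

theorem nxtF_lt_spec (box : List Int) (p : Int) (t : Nat) (h : nxtF box p t < box.length) :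
    t ≤ nxtF box p t ∧ box.getD (nxtF box p t) 0 ≤ p := by
  fun_induction nxtF box p t with
  | case1 t ht hb => exact ⟨le_refl _, hb⟩
  | case2 t ht hb ih => exact ⟨(Nat.le_succ t).trans (ih h).1, (ih h).2⟩
  | case3 t ht => omega

theorem nxtF_min (box : List Int) (p : Int) (t i : Nat)
    (h1 : t ≤ i) (h2 : i < box.length) (h3 : box.getD i 0 ≤ p) : nxtF box p t ≤ i := by
  fun_induction nxtF box p t with
  | case1 t ht hb => exact h1
  | case2 t ht hb ih =>
    have hne : t ≠ i := fun he => hb (he ▸ h3)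
    exact ih (by omega)
  | case3 t ht => omega

theorem getD_map_range_nat (t q : Nat) (f : Nat → Nat) (d : Nat) (hp : q < t) :
    (((List.range t).map f).getD q d) = f q := by
  simp [List.getD_eq_getElem?_getD, hp]

theorem set_map_range_nat (t q : Nat) (f : Nat → Nat) (v : Nat) (hp : q < t) :
    ((List.range t).map f).set q v = (List.range t).map (fun i => if i = q then v else f i) := by
  induction t generalizing q with
  | zero => simp
  | succ t ih =>
    rw [List.range_succ, List.map_append, List.map_append]
    by_cases hpt : q = t
    · subst hpt
      rw [List.set_append_right _ _ (by simp)]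
      simp
      exact fun a ha hap => absurd hap (by omega)
    · rw [List.set_append_left _ _ (by simp; omega), ih q (by omega)]
      simp
      exact fun h => absurd h (fun h => hpt h.symm)

theorem nxtArr_build (box : List Int) (p : Int) :
    ∀ k, k ≤ box.length →
    (List.range k).foldr (fun i nxt => nxt.set i (if box.getD i 0 ≤ p then i else nxt.getD (i+1) 0))
      ((List.range (box.length+1)).map (fun t => if t < k then box.length else nxtF box p t))
    = (List.range (box.length+1)).map (nxtF box p) := by
  intro k
  induction k with
  | zero => intro _; simp
  | succ k ih =>
    intro hk
    rw [List.range_succ (n := k), List.foldr_append]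
    simp only [List.foldr_cons, List.foldr_nil]
    have hget : (((List.range (box.length+1)).map
        (fun t => if t < k+1 then box.length else nxtF box p t)).getD (k+1) 0)
        = nxtF box p (k+1) := by
      rw [getD_map_range_nat _ _ _ _ (by omega), if_neg (by omega)]
    rw [hget, set_map_range_nat _ _ _ _ (by omega)]
    have hcong : ((List.range (box.length+1)).map
        (fun t => if t = k then (if box.getD k 0 ≤ p then k else nxtF box p (k+1))
                  else if t < k+1 then box.length else nxtF box p t))
        = ((List.range (box.length+1)).map
            (fun t => if t < k then box.length else nxtF box p t)) := by
      refine List.map_congr_left (fun a _ => ?_)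
      by_cases h1 : a = k
      · subst h1
        conv_lhs => rw [if_pos rfl]
        conv_rhs => rw [if_neg (show ¬ a < a by omega), nxtF, dif_pos (show a < box.length by omega)]
      · rw [if_neg h1]
        by_cases h2 : a < k
        · rw [if_pos (by omega), if_pos h2]
        · rw [if_neg (by omega), if_neg h2]
    rw [hcong]
    exact ih (by omega)

theorem nxtArr_eq (box : List Int) (p : Int) :
    nxtArr box p = (List.range (box.length+1)).map (nxtF box p) := by
  unfold nxtArr
  rw [List.foldl_reverse]
  have hinit : List.replicate (box.length + 1) box.length
      = (List.range (box.length+1)).map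
          (fun t => if t < box.length then box.length else nxtF box p t) := by
    rw [List.map_congr_left (g := fun _ => box.length) (fun a ha => by
      by_cases h : a < box.length
      · rw [if_pos h]
      · rw [if_neg h, nxtF, dif_neg h])]
    simp [List.map_const']
  rw [hinit]
  exact nxtArr_build box p box.length (le_refl _)

theorem nxtArr_getD (box : List Int) (p : Int) (t : Nat) (h : t ≤ box.length) :
    (nxtArr box p).getD t box.length = nxtF box p t := by
  rw [nxtArr_eq]
  exact getD_map_range_nat _ _ _ _ (by omega)

-- bIdx j k = the minimal i with dpG i j ≥ k (box.length if none up to box.length)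
def bIdx (box position : List Int) (j k : Nat) : Nat :=
  Nat.find (p := fun i => (k : Int) ≤ dpG box position i j ∨ i = box.length)
    ⟨box.length, Or.inr rfl⟩

theorem bIdx_le (box position : List Int) (j k : Nat) :
    bIdx box position j k ≤ box.length :=
  Nat.find_le (Or.inr rfl)

theorem bIdx_zero (box position : List Int) (j : Nat) : bIdx box position j 0 = 0 := by
  rw [bIdx, Nat.find_eq_zero]
  exact Or.inl (by simpa using dpG_nonneg box position 0 j)

theorem bIdx_min (box position : List Int) (j k : Nat) (i : Nat)
    (h : (k : Int) ≤ dpG box position i j) : bIdx box position j k ≤ i :=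
  Nat.find_le (Or.inl h)

theorem bIdx_achieves (box position : List Int) (j k : Nat)
    (h : (k : Int) ≤ dpG box position box.length j) :
    (k : Int) ≤ dpG box position (bIdx box position j k) j := by
  have hs := Nat.find_spec (p := fun i => (k : Int) ≤ dpG box position i j ∨ i = box.length)
    ⟨box.length, Or.inr rfl⟩
  rcases hs with hs | hs
  · exact hs
  · rw [bIdx, hs]; exact h

theorem bIdx_top (box position : List Int) (j k : Nat)
    (h : ¬ (k : Int) ≤ dpG box position box.length j) :
    bIdx box position j k = box.length := by
  refine le_antisymm (bIdx_le box position j k) ?_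
  by_contra hc
  have hc' : bIdx box position j k < box.length := Nat.lt_of_not_le hc
  have hs := Nat.find_spec (p := fun i => (k : Int) ≤ dpG box position i j ∨ i = box.length)
    ⟨box.length, Or.inr rfl⟩
  rcases hs with hs | hs
  · exact h (hs.trans (dpG_mono_i box position j (bIdx_le box position j k)))
  · have heq : bIdx box position j k = box.length := hs
    omega

-- the frontier update: new minimal prefix for size K is the better of the old one and
-- extending a size-(K-1) matching with the first admissible box after its frontier
theorem bIdx_step (box position : List Int) (j K : Nat) (hK1 : 1 ≤ K)
    (h : (K : Int) ≤ dpG box position box.length (j+1)) :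
    bIdx box position (j+1) K
      = min (bIdx box position j K)
          (nxtF box (position.getD j 0) (bIdx box position j (K-1)) + 1) := by
  have hxm : bIdx box position j K ≤ box.length := bIdx_le box position j K
  have hKm1 : ((K - 1 : Nat) : Int) ≤ dpG box position box.length j := by
    have h1 := dpG_lip_j box position box.length j
    omega
  -- extending through the next admissible index is valid whenever it is a real index
  have hycase : nxtF box (position.getD j 0) (bIdx box position j (K-1)) < box.length →
      (K : Int) ≤ dpG box position
        (nxtF box (position.getD j 0) (bIdx box position j (K-1)) + 1) (j+1) := by
    intro hwlt
    obtain ⟨hle, hbox⟩ := nxtF_lt_spec box (position.getD j 0) _ hwlt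
    have hach := bIdx_achieves box position j (K-1) hKm1
    have h6 := dpG_mono_i box position j hle
    exact (dpG_succ_iff box position _ j (K : Int)).mpr
      (Or.inr ⟨nxtF box (position.getD j 0) (bIdx box position j (K-1)), by omega, hbox, by omega⟩)
  -- the claimed minimum is achieved
  have hach_v : (K : Int) ≤ dpG box position
      (min (bIdx box position j K)
        (nxtF box (position.getD j 0) (bIdx box position j (K-1)) + 1)) (j+1) := by
    by_cases hKm : (K : Int) ≤ dpG box position box.length j
    · rcases Nat.le_total (bIdx box position j K)
        (nxtF box (position.getD j 0) (bIdx box position j (K-1)) + 1) with hxy | hxy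
      · rw [min_eq_left hxy]
        exact (bIdx_achieves box position j K hKm).trans
          (dpG_mono_j box position (bIdx box position j K) j)
      · rw [min_eq_right hxy]
        exact hycase (by omega)
    · have hx_top : bIdx box position j K = box.length := bIdx_top box position j K hKm
      rcases (dpG_succ_iff box position box.length j (K : Int)).mp h with hcase | ⟨i', h1, h2, h3⟩
      · exact absurd hcase hKm
      · have hb' : bIdx box position j (K-1) ≤ i' :=
          bIdx_min box position j (K-1) i' (by omega)
        have hwle := nxtF_min box (position.getD j 0) _ i' hb' h1 h2
        rw [min_eq_right (by omega)]
        exact hycase (by omega)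
  -- nothing smaller works
  have hmin_v : ∀ i, i < min (bIdx box position j K)
      (nxtF box (position.getD j 0) (bIdx box position j (K-1)) + 1) →
      ¬ (K : Int) ≤ dpG box position i (j+1) := by
    intro i hi hcon
    rcases (dpG_succ_iff box position i j (K : Int)).mp hcon with hcase | ⟨i', h1, h2, h3⟩
    · have := bIdx_min box position j K i hcase
      omega
    · have hb' : bIdx box position j (K-1) ≤ i' :=
        bIdx_min box position j (K-1) i' (by omega)
      have hi'm : i' < box.length := by omega
      have hwle := nxtF_min box (position.getD j 0) _ i' hb' hi'm h2
      omega
  refine le_antisymm (bIdx_min box position (j+1) K _ hach_v) ?_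
  by_contra hc
  have hc' := Nat.lt_of_not_le hc
  have hs := Nat.find_spec (p := fun i => (K : Int) ≤ dpG box position i (j+1) ∨ i = box.length)
    ⟨box.length, Or.inr rfl⟩
  rcases hs with hs | hs
  · exact hmin_v _ hc' hs
  · have heq : bIdx box position (j+1) K = box.length := hs
    omega

-- one step of growth of the best total, and when it happens
theorem dpG_top_cases (box position : List Int) (j : Nat) :
    dpG box position box.length (j+1) = dpG box position box.length j ∨
    dpG box position box.length (j+1) = dpG box position box.length j + 1 := by
  have h1 := dpG_mono_j box position box.length j
  have h2 := dpG_lip_j box position box.length j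
  omega

theorem ext_iff (box position : List Int) (j : Nat) :
    dpG box position box.length (j+1) = dpG box position box.length j + 1 ↔
      nxtF box (position.getD j 0)
        (bIdx box position j (dpG box position box.length j).toNat) < box.length := by
  set L := (dpG box position box.length j).toNat with hL
  have hLc : (L : Int) = dpG box position box.length j :=
    Int.toNat_of_nonneg (dpG_nonneg box position box.length j)
  constructor
  · intro h
    have h1 : ((L + 1 : Nat) : Int) ≤ dpG box position box.length (j+1) := by push_cast; omega
    rcases (dpG_succ_iff box position box.length j ((L + 1 : Nat) : Int)).mp h1 with
      hcase | ⟨i', hi1, hi2, hi3⟩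
    · push_cast at hcase; omega
    · have hb' : bIdx box position j L ≤ i' := by
        refine bIdx_min box position j L i' ?_
        push_cast at hi3 ⊢
        omega
      have := nxtF_min box (position.getD j 0) _ i' hb' hi1 hi2
      omega
  · intro h
    obtain ⟨hle, hbox⟩ := nxtF_lt_spec box (position.getD j 0) _ h
    have hach : (L : Int) ≤ dpG box position (bIdx box position j L) j :=
      bIdx_achieves box position j L (by omega)
    have h6 := dpG_mono_i box position j hle
    have h2 : ((L : Int) + 1) ≤ dpG box position
        (nxtF box (position.getD j 0) (bIdx box position j L) + 1) (j+1) :=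
      (dpG_succ_iff box position _ j ((L : Int) + 1)).mpr
        (Or.inr ⟨nxtF box (position.getD j 0) (bIdx box position j L), by omega, hbox, by omega⟩)
    have h3 := dpG_mono_i box position (j+1)
      (by omega : nxtF box (position.getD j 0) (bIdx box position j L) + 1 ≤ box.length)
    have h4 := dpG_lip_j box position box.length j
    omega

-- the frontier Source B maintains after j positions
def frontSpec (box position : List Int) (j : Nat) : List Nat :=
  (List.range (dpG box position box.length j).toNat).map
    (fun k => bIdx box position j (k+1))

theorem starts_getLastD (box position : List Int) (j : Nat) :
    (0 :: frontSpec box position j).getLastD 0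
      = bIdx box position j (dpG box position box.length j).toNat := by
  unfold frontSpec
  cases hL : (dpG box position box.length j).toNat with
  | zero => simp [bIdx_zero]
  | succ l =>
    rw [List.range_succ, List.map_append]
    simp only [List.map_cons, List.map_nil]
    rw [List.getLastD_eq_getLast?, ← List.cons_append, List.getLast?_concat]
    rfl

theorem front_step (box position : List Int) (j : Nat) :
    altStep box (position.getD j 0) (frontSpec box position j)
      = frontSpec box position (j+1) := by
  set p := position.getD j 0 with hp
  set L := (dpG box position box.length j).toNat with hL
  have hLc : (L : Int) = dpG box position box.length j :=
    Int.toNat_of_nonneg (dpG_nonneg box position box.length j)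
  simp only [altStep]
  rw [starts_getLastD box position j, ← hL]
  set w := nxtF box p (bIdx box position j L) with hw
  have hwm : w ≤ box.length := nxtF_le box p _
  rw [nxtArr_getD box p _ (bIdx_le box position j L), ← hw]
  have hfront' : ((frontSpec box position j).zip (0 :: frontSpec box position j)).map
        (fun os => min os.1 ((nxtArr box p).getD os.2 box.length + 1))
      = (List.range L).map
          (fun k => min (bIdx box position j (k+1)) (nxtF box p (bIdx box position j k) + 1)) := by
    apply List.ext_getElem
    · simp [frontSpec, ← hL]
    · intro k h1 h2
      simp only [List.getElem_map, List.getElem_zip, List.getElem_range]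
      have hk : k < L := by simpa [frontSpec, ← hL] using h2
      have e1 : (frontSpec box position j)[k]'(by simp [frontSpec, ← hL]; omega)
          = bIdx box position j (k+1) := by
        simp [frontSpec, ← hL]
      have e2 : (0 :: frontSpec box position j)[k]'(by simp [frontSpec, ← hL]; omega)
          = bIdx box position j k := by
        cases k with
        | zero => simp [bIdx_zero]
        | succ k' => simp [frontSpec, ← hL]
      rw [e1, e2, nxtArr_getD box p _ (bIdx_le box position j k)]
  rw [hfront']
  have hstep : ∀ k, k < L →
      bIdx box position (j+1) (k+1)
        = min (bIdx box position j (k+1)) (nxtF box p (bIdx box position j k) + 1) := by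
    intro k hk
    have hach : ((k+1 : Nat) : Int) ≤ dpG box position box.length (j+1) := by
      have := dpG_mono_j box position box.length j
      push_cast
      omega
    have := bIdx_step box position j (k+1) (by omega) hach
    simpa using this
  rcases dpG_top_cases box position j with hsame | hgrow
  · -- no extension: the best total does not grow, the frontier keeps its length
    have hnoext : ¬ w < box.length := by
      intro hcon
      have := (ext_iff box position j).mpr hcon
      omega
    rw [if_neg hnoext]
    unfold frontSpec
    rw [hsame, ← hL]
    apply List.ext_getElem
    · simp
    · intro k h1 h2
      simp only [List.getElem_map, List.getElem_range]
      have hk : k < L := by simpa using h1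
      rw [hstep k hk]
  · -- extension: the best total grows by one, append the new frontier entry
    have hext : w < box.length := (ext_iff box position j).mp hgrow
    rw [if_pos hext]
    unfold frontSpec
    rw [hgrow]
    have hLn : (dpG box position box.length j + 1).toNat = L + 1 := by omega
    rw [hLn, List.range_succ, List.map_append]
    congr 1
    · apply List.ext_getElem
      · simp
      · intro k h1 h2
        simp only [List.getElem_map, List.getElem_range]
        have hk : k < L := by simpa using h1
        rw [hstep k hk]
    · simp only [List.map_cons, List.map_nil]
      congr 1
      have hach : ((L+1 : Nat) : Int) ≤ dpG box position box.length (j+1) := by push_cast; omega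
      have := bIdx_step box position j (L+1) (by omega) hach
      simp only [Nat.add_sub_cancel] at this
      rw [this]
      have htop : bIdx box position j (L+1) = box.length := by
        refine bIdx_top box position j (L+1) ?_
        push_cast
        omega
      rw [htop, ← hw]
      omega

theorem alt_outer (box position : List Int) :
    ∀ (suf : List Int) (j : Nat) (front : List Nat),
      position.drop j = suf → front = frontSpec box position j →
      suf.foldl (fun front p => altStep box p front) front
        = frontSpec box position (j + suf.length) := by
  intro suf
  induction suf with
  | nil => intro j front _ h; simpa using h
  | cons p rest ih =>
    intro j front hdrop hfront
    have hpv : p = position.getD j 0 := by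
      have h1 := (List.getElem?_drop : (List.drop j position)[0]? = position[j+0]?)
      rw [hdrop] at h1
      simp only [List.getElem?_cons_zero, Nat.add_zero] at h1
      simp [List.getD_eq_getElem?_getD, ← h1]
    have hdrop' : position.drop (j+1) = rest := by
      have h2 := (List.tail_drop : (List.drop j position).tail = List.drop (j+1) position)
      rw [hdrop] at h2
      simpa using h2.symm
    simp only [List.foldl_cons]
    have hstep : altStep box p front = frontSpec box position (j+1) := by
      rw [hfront, hpv]
      exact front_step box position j
    have hrec := ih (j+1) _ hdrop' hstep
    have harg : j + 1 + rest.length = j + (p :: rest).length := by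
      simp [List.length_cons]; omega
    rw [hrec, harg]

theorem putBox_alt_eq_dpG (box position : List Int) :
    putBox_alt box position = dpG box position box.length position.length := by
  unfold putBox_alt
  have h0 : ([] : List Nat) = frontSpec box position 0 := by
    unfold frontSpec
    rw [dpG_zero_right]
    simp
  rw [h0, alt_outer box position position 0 _ rfl rfl]
  simp only [Nat.zero_add]
  unfold frontSpec
  simp only [List.length_map, List.length_range]
  exact Int.toNat_of_nonneg (dpG_nonneg box position box.length position.length)

-- ===== VERDICT (by name: the statement is the Claim_ definition above) =====
theorem putBox_spec : Claim_equal_putBox := by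
  intro box position _
  unfold Spec_putBox
  rw [putBox_eq_dpF, putBox_alt_eq_dpG, dpG_eq_dpF]
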